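-- pv_equiv track=rewrite | github.com/lsantuari/ug100-eval | analyses/cmrg_table/generate_cmrg_table.py | merge_counts
-- ===== SOURCE A (Python) =====
-- def merge_counts(c1, c2, l1, l2):
--     genes = set(c1[l1].keys()) | set(c2[l2].keys())
--     merged = {}
--     for g in genes:
--         merged[g] = {
--             l1: c1[l1].get(g, {"SNV_TP": 0, "SNV_FP": 0, "Indel_TP": 0, "Indel_FP": 0}),
--             l2: c2[l2].get(g, {"SNV_TP": 0, "SNV_FP": 0, "Indel_TP": 0, "Indel_FP": 0}),
--         }
--     return merged
-- ===== SOURCE B (Python) =====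
-- _DEFAULT = {"SNV_TP": 0, "SNV_FP": 0, "Indel_TP": 0, "Indel_FP": 0}
--
--
-- def merge_counts(c1, c2, l1, l2):
--     d1, d2 = c1[l1], c2[l2]
--     merged = {}
--     for g, v in d1.items():
--         merged[g] = {l1: v, l2: dict(_DEFAULT)}
--     for g, v in d2.items():
--         if g in merged:
--             merged[g][l2] = v
--         else:
--             merged[g] = {l1: dict(_DEFAULT), l2: v}
--     return merged
-- ===== Notes on version B (the rewrite author's own statement) =====
-- stated objective: alternative
-- what changed: A builds the union set of gene keys and fills each merged entry by two .get lookups in one pass over that set; B never builds a union set and instead makes two source-driven passes, seeding merged from c1[l1].items() and then updating in place or appending from c2[l2].items(). Pre_ excludes inputs where A raises KeyError (l1 not in c1 or l2 not in c2) and association lists with duplicate keys in the two selected inner dicts, which do not represent any Python dict.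
import Mathlib
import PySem

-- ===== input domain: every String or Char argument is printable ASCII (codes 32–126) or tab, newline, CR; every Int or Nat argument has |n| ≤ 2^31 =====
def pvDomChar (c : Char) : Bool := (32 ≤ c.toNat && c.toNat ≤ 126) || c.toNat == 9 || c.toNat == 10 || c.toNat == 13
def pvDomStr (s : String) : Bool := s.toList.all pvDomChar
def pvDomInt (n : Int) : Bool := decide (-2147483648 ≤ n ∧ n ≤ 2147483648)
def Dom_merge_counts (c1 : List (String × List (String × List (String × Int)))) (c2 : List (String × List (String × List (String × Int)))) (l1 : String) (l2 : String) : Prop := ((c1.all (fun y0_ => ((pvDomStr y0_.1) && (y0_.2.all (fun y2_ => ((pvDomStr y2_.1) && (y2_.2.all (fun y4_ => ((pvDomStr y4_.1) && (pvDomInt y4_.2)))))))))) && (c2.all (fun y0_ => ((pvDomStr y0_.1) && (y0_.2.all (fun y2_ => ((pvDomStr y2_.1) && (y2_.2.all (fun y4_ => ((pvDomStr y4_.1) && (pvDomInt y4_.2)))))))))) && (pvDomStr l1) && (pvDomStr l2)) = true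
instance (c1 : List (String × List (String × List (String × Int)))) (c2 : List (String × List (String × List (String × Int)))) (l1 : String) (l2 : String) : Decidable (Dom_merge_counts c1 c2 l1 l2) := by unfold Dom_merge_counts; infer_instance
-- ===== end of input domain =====

-- B replaces A's union-set pass over genes by two source-driven passes over the two inner
-- dicts (no union set is built); equal return values are proved, objective: alternative.

-- the default counts dict literal both programs use
def pvDefaultCounts : List (String × Int) :=
  [("SNV_TP", 0), ("SNV_FP", 0), ("Indel_TP", 0), ("Indel_FP", 0)]

-- ===== PORT A =====
def merge_counts (c1 : List (String × List (String × List (String × Int)))) (c2 : List (String × List (String × List (String × Int)))) (l1 : String) (l2 : String) : List (String × List (String × List (String × Int))) :=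
  match (PySem.Dict.mk c1).get? l1, (PySem.Dict.mk c2).get? l2 with
  | some d1, some d2 =>
      -- genes = set(c1[l1].keys()) | set(c2[l2].keys())
      let genes : PySem.Set String :=
        PySem.Set.union (PySem.Set.ofList ((PySem.Dict.mk d1).keys))
                        (PySem.Set.ofList ((PySem.Dict.mk d2).keys))
      -- for g in genes: merged[g] = {l1: c1[l1].get(g, default), l2: c2[l2].get(g, default)}
      (genes.foldl (fun m g =>
          m.insert g ((((PySem.Dict.empty).insert l1 ((PySem.Dict.mk d1).getD g pvDefaultCounts)).insert
                        l2 ((PySem.Dict.mk d2).getD g pvDefaultCounts)).items))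
        PySem.Dict.empty).items
  | _, _ => []  -- KeyError (excluded by Pre_)

-- ===== PORT B =====
def merge_counts_alt (c1 : List (String × List (String × List (String × Int)))) (c2 : List (String × List (String × List (String × Int)))) (l1 : String) (l2 : String) : List (String × List (String × List (String × Int))) :=
  match (PySem.Dict.mk c1).get? l1 with
  | none => []  -- KeyError (excluded by Pre_)
  | some d1 =>
    match (PySem.Dict.mk c2).get? l2 with
    | none => []  -- KeyError (excluded by Pre_)
    | some d2 =>
      -- first pass: for g, v in d1.items(): merged[g] = {l1: v, l2: dict(_DEFAULT)}
      let m1 : PySem.Dict String (List (String × List (String × Int))) :=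
        d1.foldl (fun m p =>
            m.insert p.1 ((((PySem.Dict.empty).insert l1 p.2).insert l2 pvDefaultCounts).items))
          PySem.Dict.empty
      -- second pass: for g, v in d2.items(): update in place or append
      let m2 : PySem.Dict String (List (String × List (String × Int))) :=
        d2.foldl (fun m p =>
            if m.contains p.1 then
              m.modify p.1 [] (fun inner => ((PySem.Dict.mk inner).insert l2 p.2).items)
            else
              m.insert p.1 ((((PySem.Dict.empty).insert l1 pvDefaultCounts).insert l2 p.2).items))
          m1
      m2.items

-- ===== PRECONDITION & SPEC =====
-- Pre_ requires l1 ∈ c1 and l2 ∈ c2 (otherwise A raises KeyError) and that the two selected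
-- inner association lists have no duplicate keys: a Python dict cannot carry duplicate keys,
-- so duplicate-key association lists do not represent any input the Python programs can see.
def Pre_merge_counts (c1 : List (String × List (String × List (String × Int)))) (c2 : List (String × List (String × List (String × Int)))) (l1 : String) (l2 : String) : Prop :=
  ((PySem.Dict.mk c1).get? l1).isSome = true ∧ ((PySem.Dict.mk c2).get? l2).isSome = true ∧
  (((PySem.Dict.mk c1).getD l1 []).map Prod.fst).Nodup ∧
  (((PySem.Dict.mk c2).getD l2 []).map Prod.fst).Nodup
instance (c1 : List (String × List (String × List (String × Int)))) (c2 : List (String × List (String × List (String × Int)))) (l1 : String) (l2 : String) : Decidable (Pre_merge_counts c1 c2 l1 l2) := by unfold Pre_merge_counts; infer_instance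

def pvWitness_merge_counts : (List (String × List (String × List (String × Int)))) × (List (String × List (String × List (String × Int)))) × String × String :=
  ([("L1", [("g", [("SNV_TP", 1)])])], [("L2", [("h", [("SNV_FP", 2)])])], "L1", "L2")

def Spec_merge_counts (c1 : List (String × List (String × List (String × Int)))) (c2 : List (String × List (String × List (String × Int)))) (l1 : String) (l2 : String) (out : List (String × List (String × List (String × Int)))) : Prop := out = merge_counts_alt c1 c2 l1 l2
instance (c1 : List (String × List (String × List (String × Int)))) (c2 : List (String × List (String × List (String × Int)))) (l1 : String) (l2 : String) (out : List (String × List (String × List (String × Int)))) : Decidable (Spec_merge_counts c1 c2 l1 l2 out) := by unfold Spec_merge_counts; infer_instance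

-- ===== CLAIM (what is proved, stated in full; the proofs are below) =====
def Claim_equal_merge_counts : Prop := ∀ (c1 : List (String × List (String × List (String × Int)))) (c2 : List (String × List (String × List (String × Int)))) (l1 : String) (l2 : String), Dom_merge_counts c1 c2 l1 l2 → Pre_merge_counts c1 c2 l1 l2 → Spec_merge_counts c1 c2 l1 l2 (merge_counts c1 c2 l1 l2)

-- ===== LEMMAS AND PROOFS =====

-- inserting twice under the same key keeps only the second value
theorem pv_insert_insert_self {κ ν : Type} [BEq κ] [LawfulBEq κ]
    (d : PySem.Dict κ ν) (k : κ) (a b : ν) :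
    (d.insert k a).insert k b = d.insert k b := by
  apply PySem.Dict.ext
  by_cases h : d.contains k = true
  · rw [PySem.Dict.items_insert_of_contains _ _ (by simp),
        PySem.Dict.items_insert_of_contains _ _ h,
        PySem.Dict.items_insert_of_contains _ _ h, List.map_map]
    apply List.map_congr_left
    intro p _
    by_cases hp : p.1 = k <;> simp [hp]
  · rw [PySem.Dict.items_insert_of_contains _ _ (by simp),
        PySem.Dict.items_insert_of_not_contains _ _ (by simp at h; simp [h]),
        PySem.Dict.items_insert_of_not_contains _ _ (by simp at h; simp [h]),
        List.map_append]
    congr 1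
    · conv_rhs => rw [← List.map_id d.items]
      apply List.map_congr_left
      intro p hp
      have : p.1 ≠ k := by
        intro e
        apply h
        rw [PySem.Dict.contains_iff_mem_keys]
        simp only [PySem.Dict.keys]
        exact List.mem_map.mpr ⟨p, hp, e⟩
      simp [this]
    · simp

-- folding `insert` of pairwise-distinct fresh keys appends the mapped list
theorem pv_items_foldl_insert {α ν : Type} (key : α → String) (F : α → ν) :
    ∀ (l : List α) (m : PySem.Dict String ν), (l.map key).Nodup →
      (∀ a ∈ l, m.contains (key a) = false) →
      (l.foldl (fun m a => m.insert (key a) (F a)) m).items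
        = m.items ++ l.map (fun a => (key a, F a)) := by
  intro l
  induction l with
  | nil => intro m _ _; simp
  | cons x xs ih =>
      intro m hnd hfresh
      rw [List.map_cons, List.nodup_cons] at hnd
      simp only [List.foldl_cons, List.map_cons]
      rw [ih]
      · rw [PySem.Dict.items_insert_of_not_contains _ _ (hfresh x (by simp))]
        simp
      · exact hnd.2
      · intro a ha
        rw [PySem.Dict.contains_insert]
        have : key a ≠ key x := by
          intro e; exact hnd.1 (e ▸ List.mem_map.mpr ⟨a, ha, rfl⟩)
        simp [this, hfresh a (List.mem_cons_of_mem _ ha)]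

-- characterisation of B's second pass
theorem pv_pass2_items (l1 l2 : String) :
    ∀ (d2 : List (String × List (String × Int)))
      (m : PySem.Dict String (List (String × List (String × Int)))),
      (d2.map Prod.fst).Nodup → m.keys.Nodup →
      (d2.foldl (fun m p =>
          if m.contains p.1 then
            m.modify p.1 [] (fun inner => ((PySem.Dict.mk inner).insert l2 p.2).items)
          else
            m.insert p.1 ((((PySem.Dict.empty).insert l1 pvDefaultCounts).insert l2 p.2).items)) m).items
        = m.items.map (fun q => match (PySem.Dict.mk d2).get? q.1 with
            | some v => (q.1, ((PySem.Dict.mk q.2).insert l2 v).items)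
            | none => q)
          ++ (d2.filter (fun p => !(m.contains p.1))).map
              (fun p => (p.1, (((PySem.Dict.empty).insert l1 pvDefaultCounts).insert l2 p.2).items)) := by
  intro d2
  induction d2 with
  | nil =>
      intro m _ _
      simp [PySem.Dict.get?]
  | cons x rest ih =>
      obtain ⟨g, v⟩ := x
      intro m hnd hm
      rw [List.map_cons, List.nodup_cons] at hnd
      simp only [List.foldl_cons]
      by_cases hc : m.contains g = true
      · rw [if_pos hc]
        rw [ih _ hnd.2 (by rw [PySem.Dict.keys_modify, PySem.Dict.keys_insert_of_contains _ _ hc]; exact hm)]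
        have hitems : (m.modify g [] (fun inner => ((PySem.Dict.mk inner).insert l2 v).items)).items
            = m.items.map (fun p => if (p.1 == g) = true then (g, ((PySem.Dict.mk (m.getD g [])).insert l2 v).items) else p) := by
          unfold PySem.Dict.modify
          exact PySem.Dict.items_insert_of_contains _ _ hc
        rw [hitems, List.map_map]
        have hrest : (PySem.Dict.mk rest).get? g = none := by
          rw [PySem.Dict.get?_eq_none_iff_not_mem_keys, PySem.Dict.keys_mk]
          exact hnd.1
        congr 1
        · apply List.map_congr_left
          intro q hq
          by_cases hqx : q.1 = g
          · have hq' : (g, q.2) ∈ m.items := by rw [← hqx]; exact hq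
            have hgd : m.getD g [] = q.2 := PySem.Dict.getD_of_mem_items m hq' hm []
            simp only [Function.comp, hqx, beq_self_eq_true, if_pos, PySem.Dict.get?_mk_cons]
            simp [hrest, hgd]
          · have hne : (q.1 == g) = false := by simp [hqx]
            have hne' : (g == q.1) = false := by simp [Ne.symm hqx]
            simp only [Function.comp, hne, if_neg, Bool.false_eq_true, not_false_iff]
            simp [PySem.Dict.get?_mk_cons, hne']
        · rw [List.filter_cons_of_neg (by simp [hc])]
          congr 1
          apply List.filter_congr
          intro p hp
          rw [PySem.Dict.contains_modify]
          have hpx : (p.1 == g) = false := by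
            have : p.1 ≠ g := by
              intro e; exact hnd.1 (e ▸ List.mem_map.mpr ⟨p, hp, rfl⟩)
            simp [this]
          simp [hpx]
      · rw [if_neg hc]
        simp only [Bool.not_eq_true] at hc
        have hxk : g ∉ m.keys := fun h => by
          rw [← PySem.Dict.contains_iff_mem_keys] at h; rw [hc] at h; cases h
        rw [ih _ hnd.2 (by
          rw [PySem.Dict.keys_insert_of_not_contains _ _ hc]
          simp only [List.nodup_append, List.nodup_singleton, true_and]
          refine ⟨hm, ?_⟩
          intro a ha b hb e
          rw [List.mem_singleton] at hb
          rw [e, hb] at ha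
          exact hxk ha)]
        rw [PySem.Dict.items_insert_of_not_contains _ _ hc]
        rw [List.map_append, List.filter_cons_of_pos (by simp [hc])]
        have hrest : (PySem.Dict.mk rest).get? g = none := by
          rw [PySem.Dict.get?_eq_none_iff_not_mem_keys, PySem.Dict.keys_mk]
          exact hnd.1
        simp only [List.map_cons, List.map_nil]
        rw [List.append_assoc]
        congr 1
        · apply List.map_congr_left
          intro q hq
          have hqx : q.1 ≠ g := by
            intro e
            exact hxk (e ▸ (by simp only [PySem.Dict.keys]; exact List.mem_map.mpr ⟨q, hq, rfl⟩))
          have hne' : (g == q.1) = false := by simp [Ne.symm hqx]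
          simp [PySem.Dict.get?_mk_cons, hne']
        · simp only [hrest]
          rw [List.singleton_append]
          congr 2
          apply List.filter_congr
          intro p hp
          have hpx : (p.1 == g) = false := by
            have : p.1 ≠ g := by
              intro e; exact hnd.1 (e ▸ List.mem_map.mpr ⟨p, hp, rfl⟩)
            simp [this]
          rw [PySem.Dict.contains_insert]
          simp [hpx]

-- the two ports agree under Pre_
theorem pv_main (c1 c2 : List (String × List (String × List (String × Int)))) (l1 l2 : String)
    (h1 : ((PySem.Dict.mk c1).get? l1).isSome = true)
    (h2 : ((PySem.Dict.mk c2).get? l2).isSome = true)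
    (hn1 : (((PySem.Dict.mk c1).getD l1 []).map Prod.fst).Nodup)
    (hn2 : (((PySem.Dict.mk c2).getD l2 []).map Prod.fst).Nodup) :
    merge_counts c1 c2 l1 l2 = merge_counts_alt c1 c2 l1 l2 := by
  obtain ⟨d1, e1⟩ := Option.isSome_iff_exists.mp h1
  obtain ⟨d2, e2⟩ := Option.isSome_iff_exists.mp h2
  rw [PySem.Dict.getD_eq_get?_getD, e1] at hn1
  rw [PySem.Dict.getD_eq_get?_getD, e2] at hn2
  simp only [Option.getD_some] at hn1 hn2
  simp only [merge_counts, merge_counts_alt, e1, e2]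
  -- A side: genes list
  have hgenes : PySem.Set.union (PySem.Set.ofList ((PySem.Dict.mk d1).keys))
      (PySem.Set.ofList ((PySem.Dict.mk d2).keys))
      = (d1.map Prod.fst) ++ (d2.map Prod.fst).filter
          (fun y => !(PySem.Set.contains (d1.map Prod.fst) y)) := by
    show PySem.Set.update _ _ = _
    rw [PySem.Dict.keys_mk, PySem.Dict.keys_mk,
        PySem.Set.update_eq_append_filter, PySem.Set.ofList_ofList,
        PySem.Set.ofList_eq_self_of_nodup _ hn1, PySem.Set.ofList_eq_self_of_nodup _ hn2]
  have hgnd : (PySem.Set.union (PySem.Set.ofList ((PySem.Dict.mk d1).keys))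
      (PySem.Set.ofList ((PySem.Dict.mk d2).keys)) : List String).Nodup :=
    PySem.Set.nodup_union _ _ (PySem.Set.nodup_ofList _)
  -- A side: items of the fold
  rw [pv_items_foldl_insert (fun g => g) (fun g =>
    ((((PySem.Dict.empty).insert l1 ((PySem.Dict.mk d1).getD g pvDefaultCounts)).insert
      l2 ((PySem.Dict.mk d2).getD g pvDefaultCounts)).items)) _ PySem.Dict.empty
    (by simpa using hgnd) (by intro a _; rfl)]
  rw [hgenes]
  have hm1 : (List.foldl (fun m p => m.insert p.1 ((PySem.Dict.empty.insert l1 p.2).insert l2 pvDefaultCounts).items) PySem.Dict.empty d1).items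
      = d1.map (fun p => (p.1, ((PySem.Dict.empty.insert l1 p.2).insert l2 pvDefaultCounts).items)) := by
    simpa using pv_items_foldl_insert Prod.fst
      (fun p => ((PySem.Dict.empty.insert l1 p.2).insert l2 pvDefaultCounts).items)
      d1 PySem.Dict.empty hn1 (by intro a _; rfl)
  have hm1keys : (List.foldl (fun m p => m.insert p.1 ((PySem.Dict.empty.insert l1 p.2).insert l2 pvDefaultCounts).items) PySem.Dict.empty d1).keys
      = d1.map Prod.fst := by
    simp only [PySem.Dict.keys, hm1, List.map_map]
    rfl
  rw [pv_pass2_items l1 l2 d2 _ hn2 (by rw [hm1keys]; exact hn1), hm1]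
  have hd1keysnd : (PySem.Dict.mk d1).keys.Nodup := by simp only [PySem.Dict.keys_mk]; exact hn1
  have hd2keysnd : (PySem.Dict.mk d2).keys.Nodup := by simp only [PySem.Dict.keys_mk]; exact hn2
  rw [show (PySem.Dict.empty : PySem.Dict String (List (String × List (String × Int)))).items = [] from rfl,
      List.nil_append, List.map_append, List.map_map]
  congr 1
  · rw [List.map_map]
    apply List.map_congr_left
    intro p hp
    have hp' : (p.1, p.2) ∈ d1 := by simpa using hp
    have hg1 : (PySem.Dict.mk d1).getD p.1 pvDefaultCounts = p.2 :=
      PySem.Dict.getD_of_mem_items _ hp' hd1keysnd _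
    cases e : (PySem.Dict.mk d2).get? p.1 with
    | none =>
        have hg2 : (PySem.Dict.mk d2).getD p.1 pvDefaultCounts = pvDefaultCounts := by
          rw [PySem.Dict.getD_eq_get?_getD, e]; rfl
        simp only [Function.comp, hg1, hg2, e]
    | some v =>
        have hg2 : (PySem.Dict.mk d2).getD p.1 pvDefaultCounts = v := by
          rw [PySem.Dict.getD_eq_get?_getD, e]; rfl
        simp only [Function.comp, hg1, hg2, e]
        have hmk : PySem.Dict.mk (((PySem.Dict.empty.insert l1 p.2).insert l2 pvDefaultCounts).items)
            = (PySem.Dict.empty.insert l1 p.2).insert l2 pvDefaultCounts := rfl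
        rw [hmk, pv_insert_insert_self]
  · have hc : ∀ x, (List.foldl (fun m p => m.insert p.1 ((PySem.Dict.empty.insert l1 p.2).insert l2 pvDefaultCounts).items) PySem.Dict.empty d1).contains x
        = PySem.Set.contains (d1.map Prod.fst) x := by
      intro x
      by_cases h : x ∈ d1.map Prod.fst
      · rw [(PySem.Dict.contains_iff_mem_keys _ _).mpr (hm1keys ▸ h),
            (PySem.Set.contains_iff _ _).mpr h]
      · have a1 : ¬ (List.foldl (fun m p => m.insert p.1 ((PySem.Dict.empty.insert l1 p.2).insert l2 pvDefaultCounts).items) PySem.Dict.empty d1).contains x = true :=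
          fun hh => h (hm1keys ▸ (PySem.Dict.contains_iff_mem_keys _ _).mp hh)
        have a2 : ¬ PySem.Set.contains (d1.map Prod.fst) x = true :=
          fun hh => h ((PySem.Set.contains_iff _ _).mp hh)
        rw [Bool.not_eq_true] at a1 a2
        rw [a1, a2]
    rw [List.filter_map, List.map_map]
    rw [List.filter_congr (q := fun p => !(List.foldl (fun m p => m.insert p.1 ((PySem.Dict.empty.insert l1 p.2).insert l2 pvDefaultCounts).items) PySem.Dict.empty d1).contains p.1)
        (by intro p _; simp only [Function.comp, hc])]
    apply List.map_congr_left
    intro p hp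
    rw [List.mem_filter] at hp
    have hmem : p.1 ∉ d1.map Prod.fst := by
      intro h
      have := hp.2
      rw [hc p.1, (PySem.Set.contains_iff _ _).mpr h] at this
      simp at this
    have hg1 : (PySem.Dict.mk d1).getD p.1 pvDefaultCounts = pvDefaultCounts := by
      rw [PySem.Dict.getD_eq_get?_getD,
          (PySem.Dict.get?_eq_none_iff_not_mem_keys _ _).mpr (by rw [PySem.Dict.keys_mk]; exact hmem)]
      rfl
    have hp' : (p.1, p.2) ∈ d2 := by simpa using hp.1
    have hg2 : (PySem.Dict.mk d2).getD p.1 pvDefaultCounts = p.2 :=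
      PySem.Dict.getD_of_mem_items _ hp' hd2keysnd _
    simp only [Function.comp, hg1, hg2]

-- ===== VERDICT (by name: the statement is the Claim_ definition above) =====
theorem merge_counts_spec : Claim_equal_merge_counts := by
  intro c1 c2 l1 l2 _ hpre
  unfold Spec_merge_counts
  exact pv_main c1 c2 l1 l2 hpre.1 hpre.2.1 hpre.2.2.1 hpre.2.2.2
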